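-- pv_equiv track=rewrite | github.com/tinoosan/agen8 | pkg/tools/builtins/code_exec_python_wrapper.py | _is_vfs_path
-- ===== SOURCE A (Python) =====
-- _VFS_MOUNT_PREFIXES = (
--     "/workspace",
--     "/project",
--     "/knowledge",
--     "/skills",
--     "/plan",
--     "/memory",
--     "/tasks",
--     "/deliverables",
--     "/log",
--     "/inbox",
--     "/outbox",
--     "/subagents",
-- )
--
-- def _is_vfs_path(path):
--     """Return True if path is an absolute VFS mount path."""
--     if not path or not isinstance(path, str):
--         return False
--     p = path.strip()
--     if not p.startswith("/"):
--         return False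
--     for prefix in _VFS_MOUNT_PREFIXES:
--         if p == prefix or p.startswith(prefix + "/"):
--             return True
--     return False
-- ===== SOURCE B (Python) =====
-- _VFS_MOUNT_PREFIXES = (
--     "/workspace",
--     "/project",
--     "/knowledge",
--     "/skills",
--     "/plan",
--     "/memory",
--     "/tasks",
--     "/deliverables",
--     "/log",
--     "/inbox",
--     "/outbox",
--     "/subagents",
-- )
--
-- # mount names = the prefixes without their leading '/', precomputed once
-- _VFS_MOUNT_NAMES = frozenset(pre[1:] for pre in _VFS_MOUNT_PREFIXES)
--
-- def _is_vfs_path(path):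
--     """Return True if path is an absolute VFS mount path."""
--     if not path or not isinstance(path, str):
--         return False
--     p = path.strip()
--     if not p.startswith("/"):
--         return False
--     return p[1:].split("/", 1)[0] in _VFS_MOUNT_NAMES
-- ===== Notes on version B (the rewrite author's own statement) =====
-- stated objective: idiomatic
-- what changed: B computes the first path component of the stripped path once (via a single split) and tests its membership in a precomputed frozenset of mount names, replacing A's loop that compares the path against each of the 12 mount prefixes with an equality and a startswith test.
import Mathlib
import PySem

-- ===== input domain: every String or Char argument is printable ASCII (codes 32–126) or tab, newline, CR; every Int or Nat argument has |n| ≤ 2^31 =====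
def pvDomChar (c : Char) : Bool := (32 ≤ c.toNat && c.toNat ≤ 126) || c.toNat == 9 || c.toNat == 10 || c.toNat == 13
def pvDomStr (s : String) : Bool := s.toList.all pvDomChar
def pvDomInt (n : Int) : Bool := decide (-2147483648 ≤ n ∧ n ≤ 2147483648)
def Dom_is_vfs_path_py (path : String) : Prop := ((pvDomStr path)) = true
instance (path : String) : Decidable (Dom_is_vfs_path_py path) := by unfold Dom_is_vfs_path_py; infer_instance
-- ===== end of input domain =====

-- B replaces A's per-prefix loop by one first-path-component extraction plus a set-membership test (idiomatic rewrite, same cost class).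

-- ===== PORT A =====
def pvVfsPrefixes : List String :=
  ["/workspace", "/project", "/knowledge", "/skills", "/plan", "/memory",
   "/tasks", "/deliverables", "/log", "/inbox", "/outbox", "/subagents"]

-- the for-loop over _VFS_MOUNT_PREFIXES with early return True
def pvLoopA : List String → String → Bool
  | [], _ => false
  | pre :: rest, p =>
    if p == pre || PySem.Str.startswith p (pre ++ "/") then true else pvLoopA rest p

def is_vfs_path_py (path : String) : Bool :=
  if path == "" then false
  else
    let p := PySem.Str.strip path
    if ¬ PySem.Str.startswith p "/" then false
    else pvLoopA pvVfsPrefixes p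

-- ===== PORT B =====
-- frozenset(pre[1:] for pre in _VFS_MOUNT_PREFIXES)
def pvVfsNames : PySem.Set String :=
  PySem.Set.ofList
    ["workspace", "project", "knowledge", "skills", "plan", "memory",
     "tasks", "deliverables", "log", "inbox", "outbox", "subagents"]

def is_vfs_path_py_alt (path : String) : Bool :=
  if path == "" then false
  else
    let p := PySem.Str.strip path
    if ¬ PySem.Str.startswith p "/" then false
    else
      let parts := (PySem.Str.splitMax? (PySem.Str.slice p (some 1) none) "/" 1).getD []  -- never none: the separator "/" is nonempty
      pvVfsNames.contains (parts.headD "")  -- parts[0]: split never returns an empty list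

-- ===== PRECONDITION & SPEC =====
def Spec_is_vfs_path_py (path : String) (out : Bool) : Prop := out = is_vfs_path_py_alt path
instance (path : String) (out : Bool) : Decidable (Spec_is_vfs_path_py path out) := by unfold Spec_is_vfs_path_py; infer_instance

-- ===== CLAIM (what is proved, stated in full; the proofs are below) =====
def Claim_equal_is_vfs_path_py : Prop := ∀ (path : String), Dom_is_vfs_path_py path → Spec_is_vfs_path_py path (is_vfs_path_py path)

-- ===== LEMMAS AND PROOFS =====

-- head of splitOnMax.go with maxsplit already 0 and a one-element accumulator
lemma pv_go_head_zero (l cur a : List Char) (fuel : Nat) :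
    (PySem.Chars.splitOnMax.go ['/'] fuel 0 l cur [a]).headD [] = a := by
  cases fuel with
  | zero => simp [PySem.Chars.splitOnMax.go]
  | succ f => cases l with
    | nil => simp [PySem.Chars.splitOnMax.go]
    | cons c rest => simp [PySem.Chars.splitOnMax.go]

-- head of the maxsplit=1 split on '/' is the first path component
lemma pv_go_head (l cur : List Char) (fuel : Nat) (h : l.length < fuel) :
    (PySem.Chars.splitOnMax.go ['/'] fuel 1 l cur []).headD []
      = cur.reverse ++ l.takeWhile (· ≠ '/') := by
  induction l generalizing cur fuel with
  | nil =>
    cases fuel with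
    | zero => omega
    | succ f => simp [PySem.Chars.splitOnMax.go]
  | cons c rest ih =>
    cases fuel with
    | zero => omega
    | succ f =>
      by_cases hc : c = '/'
      · subst hc
        simp only [PySem.Chars.splitOnMax.go, List.isPrefixOf]
        simp only [List.takeWhile, decide_not]
        have := pv_go_head_zero rest [] cur.reverse f
        simpa using this
      · simp only [PySem.Chars.splitOnMax.go]
        have : List.isPrefixOf ['/'] (c :: rest) = false := by
          simp [List.isPrefixOf]; exact fun h => absurd h.symm hc
        rw [this]
        simp only [if_neg (by decide : ¬ (1 : Nat) = 0), Bool.false_eq_true, if_false]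
        rw [ih (c :: cur) f (by simpa using Nat.lt_of_succ_lt_succ h)]
        simp [List.takeWhile, hc]

lemma pv_drop_head (l : List Char) (c : Char) (t : List Char)
    (hd : l.dropWhile (· ≠ '/') = c :: t) : c = '/' := by
  induction l with
  | nil => simp at hd
  | cons a as ih =>
    by_cases ha : a = '/'
    · rw [List.dropWhile_cons] at hd
      simp [ha] at hd
      exact (ha ▸ hd.1.symm)
    · rw [List.dropWhile_cons] at hd
      simp [ha] at hd
      exact ih (by simpa using hd)

-- per-prefix test of A = equality of the first path component with the mount name
lemma pv_step (rest nameL : List Char) (h : '/' ∉ nameL) :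
    (rest = nameL ∨ (nameL ++ ['/']) <+: rest) ↔ rest.takeWhile (· ≠ '/') = nameL := by
  have hall : nameL.takeWhile (· ≠ '/') = nameL := by
    rw [List.takeWhile_eq_self_iff]
    intro a ha; simp; exact fun e => h (e ▸ ha)
  constructor
  · rintro (rfl | ⟨t, rfl⟩)
    · exact hall
    · rw [List.append_assoc, List.takeWhile_append]
      split_ifs with hlen
      · simp
      · exact absurd (by rw [hall]) hlen
  · intro ht
    have hsplit : rest = nameL ++ rest.dropWhile (· ≠ '/') := by
      conv_lhs => rw [← List.takeWhile_append_dropWhile (p := (· ≠ '/')) (l := rest)]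
      rw [ht]
    cases hd : rest.dropWhile (· ≠ '/') with
    | nil => left; rw [hsplit, hd, List.append_nil]
    | cons c t =>
      right
      have hc : c = '/' := pv_drop_head rest c t hd
      exact ⟨t, by rw [hsplit, hd, hc]; simp⟩

lemma pv_one (p pre name : String) (rest : List Char) (hp : p.toList = '/' :: rest)
    (hpre : pre.toList = '/' :: name.toList) (hn : '/' ∉ name.toList) :
    ((p == pre) = true ∨ PySem.Str.startswith p (pre ++ "/") = true)
      ↔ rest.takeWhile (· ≠ '/') = name.toList := by
  have hsl : ("/" : String).toList = ['/'] := by decide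
  have happ : (pre ++ "/").toList = '/' :: (name.toList ++ ['/']) := by
    rw [String.toList_append, hpre, hsl]; simp
  rw [beq_iff_eq, ← String.toList_inj, hp, hpre,
      PySem.Str.startswith, PySem.Chars.startswith_iff, happ, hp,
      List.cons_prefix_cons]
  simp only [List.cons.injEq, true_and]
  exact pv_step rest name.toList hn

lemma pvLoopA_nil (p : String) : pvLoopA [] p = false := rfl

lemma pvLoopA_or (x : String) (xs : List String) (p : String) :
    pvLoopA (x :: xs) p
      = ((p == x || PySem.Str.startswith p (x ++ "/")) || pvLoopA xs p) := by
  cases hcond : (p == x || PySem.Str.startswith p (x ++ "/")) with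
  | true => simp only [pvLoopA, hcond, if_true, Bool.true_or]
  | false => simp only [pvLoopA, hcond, Bool.false_eq_true, if_false, Bool.false_or]

theorem pv_main (path : String) :
    is_vfs_path_py path = is_vfs_path_py_alt path := by
  unfold is_vfs_path_py is_vfs_path_py_alt
  cases h0 : (path == "") with
  | true => simp only [if_true]
  | false =>
    simp only [Bool.false_eq_true, if_false]
    cases hs : PySem.Str.startswith (PySem.Str.strip path) "/" with
    | false => simp only [Bool.false_eq_true, not_false_iff, if_true]
    | true =>
      simp only [not_true, if_false]
      obtain ⟨rest, hrest⟩ : ∃ rest, (PySem.Str.strip path).toList = '/' :: rest := by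
        have h1 : ("/" : String).toList <+: (PySem.Str.strip path).toList :=
          (PySem.Chars.startswith_iff _ _).mp hs
        rw [(by decide : ("/" : String).toList = ['/'])] at h1
        obtain ⟨t, ht⟩ := h1
        exact ⟨t, ht.symm⟩
      have hslice : (PySem.Str.slice (PySem.Str.strip path) (some 1) none).toList = rest := by
        rw [PySem.Str.slice, String.toList_ofList, PySem.Chars.slice_eq_listSlice,
            PySem.List.slice_from _ (by norm_num), hrest]
        simp
      have hsplit : PySem.Str.splitMax? (PySem.Str.slice (PySem.Str.strip path) (some 1) none) "/" 1
          = some ((PySem.Chars.splitOnMax rest ['/'] 1).map String.ofList) := by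
        rw [PySem.Str.splitMax?, PySem.Chars.splitMax?, hslice,
            (by decide : ("/" : String).toList = ['/'])]
        simp
      rw [hsplit, Option.getD_some]
      have h1 : (PySem.Chars.splitOnMax rest ['/'] 1).headD [] = rest.takeWhile (· ≠ '/') := by
        rw [PySem.Chars.splitOnMax, if_neg (by norm_num)]
        have := pv_go_head rest [] (rest.length + 1) (by omega)
        simpa using this
      have hhead : ((PySem.Chars.splitOnMax rest ['/'] 1).map String.ofList).headD ""
          = String.ofList (rest.takeWhile (· ≠ '/')) := by
        cases hsp : PySem.Chars.splitOnMax rest ['/'] 1 with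
        | nil =>
          rw [hsp] at h1
          simp only [List.headD_nil] at h1
          rw [List.map_nil, List.headD_nil, ← h1]
        | cons x xs =>
          rw [hsp] at h1
          simp only [List.headD_cons] at h1
          simp [h1]
      rw [hhead]
      rw [Bool.eq_iff_iff]
      simp only [pvVfsPrefixes, pvLoopA_or, pvLoopA_nil, Bool.or_eq_true,
        Bool.false_eq_true, or_false]
      rw [pv_one _ "/workspace" "workspace" rest hrest (by decide) (by decide),
          pv_one _ "/project" "project" rest hrest (by decide) (by decide),
          pv_one _ "/knowledge" "knowledge" rest hrest (by decide) (by decide),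
          pv_one _ "/skills" "skills" rest hrest (by decide) (by decide),
          pv_one _ "/plan" "plan" rest hrest (by decide) (by decide),
          pv_one _ "/memory" "memory" rest hrest (by decide) (by decide),
          pv_one _ "/tasks" "tasks" rest hrest (by decide) (by decide),
          pv_one _ "/deliverables" "deliverables" rest hrest (by decide) (by decide),
          pv_one _ "/log" "log" rest hrest (by decide) (by decide),
          pv_one _ "/inbox" "inbox" rest hrest (by decide) (by decide),
          pv_one _ "/outbox" "outbox" rest hrest (by decide) (by decide),
          pv_one _ "/subagents" "subagents" rest hrest (by decide) (by decide)]
      have hset : pvVfsNames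
          = ["workspace", "project", "knowledge", "skills", "plan", "memory",
             "tasks", "deliverables", "log", "inbox", "outbox", "subagents"] := by
        decide
      rw [hset]
      simp only [PySem.Set.contains, List.contains_eq_mem, List.mem_cons, List.not_mem_nil,
        or_false, ← String.toList_inj, String.toList_ofList, decide_eq_true_eq]

-- ===== VERDICT (by name: the statement is the Claim_ definition above) =====
theorem is_vfs_path_py_spec : Claim_equal_is_vfs_path_py := by
  intro path _
  unfold Spec_is_vfs_path_py
  exact pv_main path
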